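-- pv_equiv track=rewrite | github.com/Lullapalanza/kle | kle/designs/MR01_300pH.py | get_resonator_path
-- ===== SOURCE A (Python) =====
-- def get_resonator_path(w, N, gap, arm_len, end_len=15):
--     path = [(-gap -w, end_len), (-gap -w, 0), (0, 0), (arm_len, 0)]
--     lp = path[-1]
--     for i in range(N-1):
--         dir = -1 if i%2 == 0 else 1
--         path += [(lp[0], lp[1] + gap + w), (lp[0] + dir * arm_len, lp[1] + gap + w)]
--         lp = path[-1]
--
--     path += [(-gap -w, lp[1]), (-gap -w, lp[1]-end_len)]
--
--     return path
-- ===== SOURCE B (Python) =====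
-- def get_resonator_path(w, N, gap, arm_len, end_len=15):
--     # closed-form: point coordinates computed from the pair index, no threaded last point
--     g = gap + w
--     pairs = [p for i in range(N - 1)
--                for p in (((arm_len, (i + 1) * g), (0, (i + 1) * g)) if i % 2 == 0
--                          else ((0, (i + 1) * g), (arm_len, (i + 1) * g)))]
--     yf = (N - 1) * g if N >= 2 else 0
--     return [(-g, end_len), (-g, 0), (0, 0), (arm_len, 0)] + pairs + [(-g, yf), (-g, yf - end_len)]
-- ===== Notes on version B (the rewrite author's own statement) =====
-- stated objective: simpler
-- what changed: Each meander point is computed by a closed-form formula of its pair index (y=(i+1)*(gap+w), x alternating by parity) instead of threading the previous point through the loop; the tail y is the closed form (N-1)*(gap+w) for N>=2.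
import Mathlib
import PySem

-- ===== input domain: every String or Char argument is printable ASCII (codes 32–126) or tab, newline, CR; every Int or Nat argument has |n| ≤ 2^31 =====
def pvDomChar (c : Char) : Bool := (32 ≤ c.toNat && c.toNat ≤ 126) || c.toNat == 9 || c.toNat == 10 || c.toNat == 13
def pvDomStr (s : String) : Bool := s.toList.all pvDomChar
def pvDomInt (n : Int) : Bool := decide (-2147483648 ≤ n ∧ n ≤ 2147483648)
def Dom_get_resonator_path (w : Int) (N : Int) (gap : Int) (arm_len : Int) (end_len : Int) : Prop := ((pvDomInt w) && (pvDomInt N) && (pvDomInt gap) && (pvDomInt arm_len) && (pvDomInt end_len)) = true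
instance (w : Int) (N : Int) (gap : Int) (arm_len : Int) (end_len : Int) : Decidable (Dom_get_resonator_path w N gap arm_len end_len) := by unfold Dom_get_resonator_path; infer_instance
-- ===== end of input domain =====

-- B computes each meander point by a closed-form formula of its pair index instead of
-- threading the last point through the loop; same values, simpler decomposition.

-- ===== PORT A =====
-- loop body of A: state is (path, lp); appends two points and moves lp to the last one
def pvAStep (w : Int) (gap : Int) (arm_len : Int)
    (st : List (Int × Int) × (Int × Int)) (i : Int) : List (Int × Int) × (Int × Int) :=
  let dir : Int := if i % 2 == 0 then -1 else 1
  let p2 : Int × Int := (st.2.1 + dir * arm_len, st.2.2 + gap + w)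
  (st.1 ++ [(st.2.1, st.2.2 + gap + w), p2], p2)

def get_resonator_path (w : Int) (N : Int) (gap : Int) (arm_len : Int) (end_len : Int) : List (Int × Int) :=
  let path : List (Int × Int) := [(-gap - w, end_len), (-gap - w, 0), (0, 0), (arm_len, 0)]
  let st := (PySem.List.pyRange 0 (N - 1) 1).foldl (pvAStep w gap arm_len) (path, (arm_len, 0))
  st.1 ++ [(-gap - w, st.2.2), (-gap - w, st.2.2 - end_len)]

-- ===== PORT B =====
-- the two points of pair i, from the index alone
def pvBPair (w : Int) (gap : Int) (arm_len : Int) (i : Int) : List (Int × Int) :=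
  let y := (i + 1) * (gap + w)
  if i % 2 == 0 then [(arm_len, y), (0, y)] else [(0, y), (arm_len, y)]

def get_resonator_path_alt (w : Int) (N : Int) (gap : Int) (arm_len : Int) (end_len : Int) : List (Int × Int) :=
  let g := gap + w
  let pairs := (PySem.List.pyRange 0 (N - 1) 1).flatMap (pvBPair w gap arm_len)
  let yf : Int := if N ≥ 2 then (N - 1) * g else 0
  [(-g, end_len), (-g, 0), (0, 0), (arm_len, 0)] ++ pairs ++ [(-g, yf), (-g, yf - end_len)]

-- ===== PRECONDITION & SPEC =====
def Spec_get_resonator_path (w : Int) (N : Int) (gap : Int) (arm_len : Int) (end_len : Int) (out : List (Int × Int)) : Prop := out = get_resonator_path_alt w N gap arm_len end_len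
instance (w : Int) (N : Int) (gap : Int) (arm_len : Int) (end_len : Int) (out : List (Int × Int)) : Decidable (Spec_get_resonator_path w N gap arm_len end_len out) := by unfold Spec_get_resonator_path; infer_instance

-- ===== CLAIM (what is proved, stated in full; the proofs are below) =====
def Claim_equal_get_resonator_path : Prop := ∀ (w : Int) (N : Int) (gap : Int) (arm_len : Int) (end_len : Int), Dom_get_resonator_path w N gap arm_len end_len → Spec_get_resonator_path w N gap arm_len end_len (get_resonator_path w N gap arm_len end_len)

-- ===== LEMMAS AND PROOFS =====

-- invariant: after n iterations the path is the prefix plus B's first n pairs, and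
-- lp = (arm_len if n even else 0, n*(gap+w))
theorem pvLoop_inv (w gap arm_len : Int) (p0 : List (Int × Int)) (n : ℕ) :
    (PySem.List.pyRange 0 (n : Int) 1).foldl (pvAStep w gap arm_len) (p0, (arm_len, 0)) =
      (p0 ++ (PySem.List.pyRange 0 (n : Int) 1).flatMap (pvBPair w gap arm_len),
       ((if (n : Int) % 2 == 0 then arm_len else 0), (n : Int) * (gap + w))) := by
  induction n with
  | zero => simp [PySem.List.pyRange_one_eq_nil]
  | succ n ih =>
      have h : ((n : Int) + 1) = ((n + 1 : ℕ) : Int) := by push_cast; ring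
      rw [← h, PySem.List.pyRange_one_succ_right (by positivity)]
      rw [List.foldl_append, List.flatMap_append, ih]
      simp only [List.foldl, List.flatMap, List.flatten, List.map]
      unfold pvAStep pvBPair
      by_cases hn : (n : Int) % 2 = 0
      · have h2 : ((n : Int) + 1) % 2 ≠ 0 := by omega
        simp [hn, h2]
        ring
      · have h2 : ((n : Int) + 1) % 2 = 0 := by omega
        simp [hn, h2]
        ring

-- ===== VERDICT (by name: the statement is the Claim_ definition above) =====

theorem get_resonator_path_spec : Claim_equal_get_resonator_path := by
  intro w N gap arm_len end_len _
  unfold Spec_get_resonator_path get_resonator_path get_resonator_path_alt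
  by_cases hN : N ≥ 2
  · have hn : (N - 1) = (((N - 1).toNat : ℕ) : Int) := by omega
    rw [hn]
    simp only [pvLoop_inv, if_pos hN]
    simp
    ring
  · have h1 : N - 1 ≤ 0 := by omega
    rw [PySem.List.pyRange_one_eq_nil h1]
    simp [if_neg hN]
    ring
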